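-- pv_equiv track=rewrite | github.com/kkkgim/2025_study | python/pccp/pccp2.py | solution
-- ===== SOURCE A (Python) =====
-- def solution(diffs, times, limit):
--     min_level = 1
--     max_level = max(diffs)
--
--     while min_level < max_level :
--         level = (min_level+max_level)//2
--         total_time = 0
--
--         for i in range(len(diffs)):
--             diff = diffs[i]
--             time_cur = times[i]
--             time_prev = 0
--
--             if i > 0 :
--                 time_prev = times[i-1]
--
--             if diff <= level :
--                 total_time += time_cur
--             if diff > level :
--                 total_time +=  ((diff - level) * (time_cur + time_prev)) + time_cur
--
--
--         # 제한시간초과 시 최저레벨 올리기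
--         if limit < total_time :
--             min_level = level + 1
--         elif limit >= total_time :
--             max_level = level
--
--
--     return min_level
-- ===== SOURCE B (Python) =====
-- def solution(diffs, times, limit):
--     # Hoist the level-independent part of the cost out of the probe:
--     # total(level) = base + sum(max(d - level, 0) * s)  with s = t_cur + t_prev.
--     pairs = [(d, t + tp) for d, t, tp in zip(diffs, times, [0] + times)]
--     base = sum(t for _, t in zip(diffs, times))
--
--     def fits(level):
--         return base + sum(max(d - level, 0) * s for d, s in pairs) <= limit
--
--     def search(lo, hi):
--         if hi <= lo:
--             return lo
--         mid = (lo + hi) // 2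
--         return search(lo, mid) if fits(mid) else search(mid + 1, hi)
--
--     return search(1, max(diffs))
-- ===== Notes on version B (the rewrite author's own statement) =====
-- stated objective: alternative
-- what changed: The level-independent base cost is hoisted out of the bisection and each feasibility probe becomes a single branch-free pass over precomputed (difficulty, time_cur+time_prev) pairs using max(d-level,0), with the bisection written recursively, instead of A's per-probe indexed loop with branches recomputing everything.
import Mathlib
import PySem

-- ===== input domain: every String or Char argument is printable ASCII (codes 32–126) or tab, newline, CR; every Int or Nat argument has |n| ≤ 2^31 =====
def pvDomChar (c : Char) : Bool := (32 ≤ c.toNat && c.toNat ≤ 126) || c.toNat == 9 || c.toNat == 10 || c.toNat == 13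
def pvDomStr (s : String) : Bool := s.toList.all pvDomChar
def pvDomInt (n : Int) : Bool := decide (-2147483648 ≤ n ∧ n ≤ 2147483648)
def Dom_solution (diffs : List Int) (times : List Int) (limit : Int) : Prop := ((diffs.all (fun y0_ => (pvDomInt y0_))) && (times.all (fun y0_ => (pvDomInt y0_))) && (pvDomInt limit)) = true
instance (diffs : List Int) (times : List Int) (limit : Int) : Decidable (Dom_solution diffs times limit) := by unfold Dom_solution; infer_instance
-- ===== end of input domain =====

-- B restructures A's per-probe cost computation: the level-independent base cost is hoisted out of
-- the bisection and each probe becomes one branch-free pass (max(d-level,0)*s over precomputed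
-- pairs), with the bisection written recursively. Objective: alternative decomposition, same cost.

-- ===== PORT A =====
-- A's inner 'for i in range(len(diffs))' loop, computing total_time for one probed level
def aTotal (diffs times : List Int) (level : Int) : Int :=
  (PySem.List.pyRange 0 (diffs.length : Int) 1).foldl (fun total_time i =>
    let diff := PySem.List.pyGetD diffs i 0
    let time_cur := PySem.List.pyGetD times i 0
    let time_prev := if i > 0 then PySem.List.pyGetD times (i - 1) 0 else 0
    let t1 := if diff ≤ level then total_time + time_cur else total_time
    if diff > level then t1 + ((diff - level) * (time_cur + time_prev)) + time_cur else t1) 0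

-- A's 'while min_level < max_level' loop ('level' = the probed midpoint, written inline)
def aLoop (diffs times : List Int) (limit lo hi : Int) : Int :=
  if _h : lo < hi then
    if limit < aTotal diffs times (PySem.Int.floordiv (lo + hi) 2) then
      aLoop diffs times limit (PySem.Int.floordiv (lo + hi) 2 + 1) hi
    else aLoop diffs times limit lo (PySem.Int.floordiv (lo + hi) 2)
  else lo
termination_by (hi - lo).toNat
decreasing_by
  · have h1 : lo ≤ PySem.Int.floordiv (lo + hi) 2 :=
      (PySem.Int.le_floordiv_iff_mul_le (by omega)).2 (by omega)
    omega
  · have h2 : PySem.Int.floordiv (lo + hi) 2 < hi :=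
      (PySem.Int.floordiv_lt_iff_lt_mul (by omega)).2 (by omega)
    omega

def solution (diffs : List Int) (times : List Int) (limit : Int) : Int :=
  aLoop diffs times limit 1 ((PySem.List.max? diffs id).getD 0)

-- ===== PORT B =====
-- 'base + sum(max(d - level, 0) * s for d, s in pairs) <= limit'
def bFits (base : Int) (pairs : List (Int × Int)) (limit level : Int) : Bool :=
  base + (pairs.map (fun p => max (p.1 - level) 0 * p.2)).sum ≤ limit

-- 'def search(lo, hi)' ('mid' written inline)
def bSearch (base : Int) (pairs : List (Int × Int)) (limit lo hi : Int) : Int :=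
  if _h : hi ≤ lo then lo
  else
    if bFits base pairs limit (PySem.Int.floordiv (lo + hi) 2) then
      bSearch base pairs limit lo (PySem.Int.floordiv (lo + hi) 2)
    else bSearch base pairs limit (PySem.Int.floordiv (lo + hi) 2 + 1) hi
termination_by (hi - lo).toNat
decreasing_by
  · have h2 : PySem.Int.floordiv (lo + hi) 2 < hi :=
      (PySem.Int.floordiv_lt_iff_lt_mul (by omega)).2 (by omega)
    omega
  · have h1 : lo ≤ PySem.Int.floordiv (lo + hi) 2 :=
      (PySem.Int.le_floordiv_iff_mul_le (by omega)).2 (by omega)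
    omega

def solution_alt (diffs : List Int) (times : List Int) (limit : Int) : Int :=
  bSearch (((diffs.zip times).map (fun p => p.2)).sum)
    ((diffs.zip (times.zip (0 :: times))).map (fun p => (p.1, p.2.1 + p.2.2)))
    limit 1 ((PySem.List.max? diffs id).getD 0)

-- ===== PRECONDITION & SPEC =====
-- Pre_ excludes exactly the inputs on which A raises: empty diffs (max([]) is a ValueError), and
-- times shorter than diffs while some difficulty exceeds 1 (A's probe loop then raises IndexError).
def Pre_solution (diffs : List Int) (times : List Int) (limit : Int) : Prop :=
  diffs ≠ [] ∧ (diffs.length ≤ times.length ∨ ∀ d ∈ diffs, d ≤ 1)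
instance (diffs : List Int) (times : List Int) (limit : Int) : Decidable (Pre_solution diffs times limit) := by unfold Pre_solution; infer_instance

def pvWitness_solution : List Int × List Int × Int := ([3, 1, 4], [2, 5, 3], 30)

def Spec_solution (diffs : List Int) (times : List Int) (limit : Int) (out : Int) : Prop := out = solution_alt diffs times limit
instance (diffs : List Int) (times : List Int) (limit : Int) (out : Int) : Decidable (Spec_solution diffs times limit out) := by unfold Spec_solution; infer_instance

-- ===== CLAIM (what is proved, stated in full; the proofs are below) =====
def Claim_equal_solution : Prop := ∀ (diffs : List Int) (times : List Int) (limit : Int), Dom_solution diffs times limit → Pre_solution diffs times limit → Spec_solution diffs times limit (solution diffs times limit)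

-- ===== LEMMAS AND PROOFS =====

-- common structural form of one probe's total cost (proof-only helper)
def rowSum (tp : Int) (diffs times : List Int) (level : Int) : Int :=
  match diffs, times with
  | d :: ds, t :: ts => (t + max (d - level) 0 * (t + tp)) + rowSum t ds ts level
  | _, _ => 0

theorem aTotal_aux (diffs times : List Int) (level : Int) :
    ∀ (ds : List Int) (k : Nat) (ts : List Int) (tp acc : Int),
      diffs.length ≤ times.length →
      ds = diffs.drop k → ts = times.drop k →
      tp = (if k = 0 then 0 else times.getD (k - 1) 0) →
      (PySem.List.pyRange (k : Int) (diffs.length : Int) 1).foldl (fun total_time i =>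
        let diff := PySem.List.pyGetD diffs i 0
        let time_cur := PySem.List.pyGetD times i 0
        let time_prev := if i > 0 then PySem.List.pyGetD times (i - 1) 0 else 0
        let t1 := if diff ≤ level then total_time + time_cur else total_time
        if diff > level then t1 + ((diff - level) * (time_cur + time_prev)) + time_cur else t1) acc
      = acc + rowSum tp ds ts level := by
  intro ds
  induction ds with
  | nil =>
    intro k ts tp acc hlen hds hts htp
    have hk : diffs.length ≤ k := List.drop_eq_nil_iff.mp hds.symm
    rw [PySem.List.pyRange_one_eq_nil (by exact_mod_cast hk)]
    simp [rowSum]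
  | cons d ds' ih =>
    intro k ts tp acc hlen hds hts htp
    have hklen : k < diffs.length := by
      by_contra hge
      rw [List.drop_eq_nil_of_le (by omega)] at hds; simp at hds
    have hktimes : k < times.length := by omega
    have hd : diffs[k]? = some d := by rw [← List.head?_drop, ← hds]; rfl
    cases hts' : times.drop k with
    | nil =>
      have : times.length - k = 0 := by simpa using congrArg List.length hts'
      omega
    | cons t ts' =>
      have ht : times[k]? = some t := by rw [← List.head?_drop, hts']; rfl
      have hdgetD : diffs.getD k 0 = d := by simp [List.getD_eq_getElem?_getD, hd]
      have htgetD : times.getD k 0 = t := by simp [List.getD_eq_getElem?_getD, ht]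
      rw [PySem.List.pyRange_one_cons (by exact_mod_cast hklen)]
      rw [List.foldl_cons]
      have hcast : ((k : Int) + 1) = ((k + 1 : Nat) : Int) := by push_cast; ring
      rw [hcast]
      have hds' : ds' = diffs.drop (k + 1) := by
        have h1 := congrArg (List.drop 1) hds
        simpa [List.drop_drop, Nat.add_comm] using h1
      have hts'' : ts' = times.drop (k + 1) := by
        have h1 := congrArg (List.drop 1) hts'
        simpa [List.drop_drop, Nat.add_comm] using h1.symm
      rw [ih (k + 1) ts' t _ hlen hds' hts'' (by simp [ht])]
      have hstep : (let diff := PySem.List.pyGetD diffs ((k : Nat) : Int) 0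
        let time_cur := PySem.List.pyGetD times ((k : Nat) : Int) 0
        let time_prev := if ((k : Nat) : Int) > 0 then PySem.List.pyGetD times (((k : Nat) : Int) - 1) 0 else 0
        let t1 := if diff ≤ level then acc + time_cur else acc
        if diff > level then t1 + ((diff - level) * (time_cur + time_prev)) + time_cur else t1)
          = acc + (t + max (d - level) 0 * (t + tp)) := by
        simp only [PySem.List.pyGetD_natCast, hdgetD, htgetD]
        have hprev : (if (k : Int) > 0 then PySem.List.pyGetD times ((k : Int) - 1) 0 else 0) = tp := by
          cases k with
          | zero => simpa using htp.symm
          | succ j =>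
            have : ((j + 1 : Nat) : Int) - 1 = (j : Nat) := by push_cast; ring
            rw [if_pos (by positivity), this, PySem.List.pyGetD_natCast]
            simp at htp
            exact htp.symm
        rw [hprev]
        split_ifs with h1 h2 <;>
          first
            | omega
            | (rw [max_eq_right (by omega)]; ring)
            | (rw [max_eq_left (by omega)]; ring)
      rw [hstep]
      have hts2 : ts = t :: ts' := by rw [hts, hts']
      rw [hts2]
      simp [rowSum]; ring

theorem bTotal_eq_rowSum (diffs : List Int) (level : Int) :
    ∀ (times : List Int) (tp : Int), diffs.length ≤ times.length →
    ((diffs.zip times).map (fun p => p.2)).sum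
      + (((diffs.zip (times.zip (tp :: times))).map (fun p => (p.1, p.2.1 + p.2.2))).map
          (fun p => max (p.1 - level) 0 * p.2)).sum
      = rowSum tp diffs times level := by
  induction diffs with
  | nil => intro times tp _; simp [rowSum]
  | cons d ds ih =>
    intro times tp hlen
    cases times with
    | nil => simp at hlen
    | cons t ts =>
      simp only [List.zip_cons_cons, List.map_cons, List.sum_cons, rowSum]
      rw [← ih ts t (by simpa using hlen)]
      ring

theorem totals_eq (diffs times : List Int) (level : Int) (hlen : diffs.length ≤ times.length) :
    aTotal diffs times level
      = ((diffs.zip times).map (fun p => p.2)).sum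
        + (((diffs.zip (times.zip (0 :: times))).map (fun p => (p.1, p.2.1 + p.2.2))).map
            (fun p => max (p.1 - level) 0 * p.2)).sum := by
  rw [bTotal_eq_rowSum diffs level times 0 hlen]
  have h0 : ((0 : Nat) : Int) = (0 : Int) := rfl
  have := aTotal_aux diffs times level diffs 0 times 0 0 hlen (by simp) (by simp) (by simp)
  rw [h0] at this
  simpa [aTotal] using this

theorem loops_eq (diffs times : List Int) (limit base : Int) (pairs : List (Int × Int))
    (htot : ∀ level, aTotal diffs times level
      = base + (pairs.map (fun p => max (p.1 - level) 0 * p.2)).sum) :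
    ∀ (n : Nat) (lo hi : Int), (hi - lo).toNat ≤ n →
      aLoop diffs times limit lo hi = bSearch base pairs limit lo hi := by
  intro n
  induction n with
  | zero =>
    intro lo hi hb
    rw [aLoop.eq_def, bSearch.eq_def]
    rw [dif_neg (by omega), dif_pos (by omega)]
  | succ n ih =>
    intro lo hi hb
    rw [aLoop.eq_def, bSearch.eq_def]
    by_cases hlt : lo < hi
    · rw [dif_pos hlt, dif_neg (by omega)]
      have h1 : lo ≤ PySem.Int.floordiv (lo + hi) 2 :=
        (PySem.Int.le_floordiv_iff_mul_le (by omega)).2 (by omega)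
      have h2 : PySem.Int.floordiv (lo + hi) 2 < hi :=
        (PySem.Int.floordiv_lt_iff_lt_mul (by omega)).2 (by omega)
      by_cases hc : limit < aTotal diffs times (PySem.Int.floordiv (lo + hi) 2)
      · rw [if_pos hc]
        have hb' : bFits base pairs limit (PySem.Int.floordiv (lo + hi) 2) = false := by
          simp only [bFits, decide_eq_false_iff_not]
          rw [← htot]; omega
        rw [hb']
        simp only [Bool.false_eq_true, if_false]
        exact ih _ _ (by omega)
      · rw [if_neg hc]
        have hb' : bFits base pairs limit (PySem.Int.floordiv (lo + hi) 2) = true := by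
          simp only [bFits, decide_eq_true_eq]
          rw [← htot]; omega
        rw [hb']
        simp only [if_true]
        exact ih _ _ (by omega)
    · rw [dif_neg hlt, dif_pos (by omega)]

-- ===== VERDICT (by name: the statement is the Claim_ definition above) =====
theorem solution_spec : Claim_equal_solution := by
  intro diffs times limit _ hpre
  obtain ⟨hne, hcase⟩ := hpre
  unfold Spec_solution solution solution_alt
  rcases hcase with hlen | hsmall
  · exact loops_eq diffs times limit _ _ (fun level => totals_eq diffs times level hlen)
      ((((PySem.List.max? diffs id).getD 0) - 1).toNat) 1 _ le_rfl
  · cases hmax : PySem.List.max? diffs id with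
    | none =>
      simp only [Option.getD_none]
      rw [aLoop.eq_def, bSearch.eq_def]
      rw [dif_neg (by norm_num), dif_pos (by norm_num)]
    | some m =>
      have hm1 : m ≤ 1 := hsmall m (PySem.List.max?_mem hmax)
      simp only [Option.getD_some]
      rw [aLoop.eq_def, bSearch.eq_def]
      rw [dif_neg (by omega), dif_pos (by omega)]
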